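-- pv_equiv track=rewrite | github.com/hfwiz/CBTCR | MBFL-test-reduction-CBTCR-code-extend.py | format_kill_matrix_row_muse
-- ===== SOURCE A (Python) =====
-- def format_kill_matrix_row_muse(killed_mutants,pass_fail_list, n_mutants, originally_passing):
--   words = []
--   for i in range(1, n_mutants + 1):
--       if i in killed_mutants:
--           m_ind = list(killed_mutants).index(i)
--           words.append(pass_fail_list[m_ind])
--       else:
--           words.append('0')
--   words.append('+' if originally_passing else '-')
--   return ' '.join(words)
-- ===== SOURCE B (Python) =====
-- def format_kill_matrix_row_muse(killed_mutants, pass_fail_list, n_mutants, originally_passing):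
--     # Scatter: preallocate all slots as '0', then walk killed_mutants once,
--     # writing each first-seen in-range mutant's pass/fail value into its slot.
--     words = ['0'] * n_mutants
--     seen = set()
--     for idx, m in enumerate(killed_mutants):
--         if m not in seen:
--             seen.add(m)
--             if 1 <= m <= n_mutants:
--                 words[m - 1] = pass_fail_list[idx]
--     words.append('+' if originally_passing else '-')
--     return ' '.join(words)
-- ===== Notes on version B (the rewrite author's own statement) =====
-- stated objective: faster
-- what changed: B scatters: it preallocates a '0'-filled slot array and makes ONE pass over killed_mutants assigning each first-seen in-range mutant's pass/fail value into slot m-1, instead of A's gather loop over every slot 1..n_mutants with an inner membership scan plus list(...).index rescan per slot.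
import Mathlib
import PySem

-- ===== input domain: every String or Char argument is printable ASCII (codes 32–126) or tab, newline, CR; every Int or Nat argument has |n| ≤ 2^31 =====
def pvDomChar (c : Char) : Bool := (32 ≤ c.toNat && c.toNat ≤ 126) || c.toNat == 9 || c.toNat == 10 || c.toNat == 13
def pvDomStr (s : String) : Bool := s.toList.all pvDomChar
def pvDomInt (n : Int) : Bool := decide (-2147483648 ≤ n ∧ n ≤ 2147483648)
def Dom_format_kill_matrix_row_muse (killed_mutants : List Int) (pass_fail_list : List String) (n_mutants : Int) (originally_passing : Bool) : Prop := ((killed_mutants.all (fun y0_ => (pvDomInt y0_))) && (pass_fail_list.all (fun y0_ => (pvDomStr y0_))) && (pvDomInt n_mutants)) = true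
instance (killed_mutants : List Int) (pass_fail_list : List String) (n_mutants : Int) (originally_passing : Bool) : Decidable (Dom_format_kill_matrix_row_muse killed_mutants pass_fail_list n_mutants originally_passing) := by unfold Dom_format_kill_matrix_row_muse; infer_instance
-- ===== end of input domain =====

-- B scatters each first-seen in-range mutant's value into a preallocated '0'-slot array in one
-- pass over killed_mutants, replacing A's per-slot membership scan + index rescan (objective: faster).

-- ===== PORT A =====
-- literal port of A: for each i in 1..n_mutants, scan killed_mutants for membership and first index;
-- pass_fail_list[m_ind] is pyGet? (.getD "" is unreachable under Pre_: Python raises IndexError there)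
def format_kill_matrix_row_muse (killed_mutants : List Int) (pass_fail_list : List String) (n_mutants : Int) (originally_passing : Bool) : String :=
  let words : List String :=
    (PySem.List.pyRange 1 (n_mutants + 1) 1).foldl (fun ws i =>
      if killed_mutants.contains i then
        match PySem.List.index? killed_mutants i with
        | some m_ind => ws ++ [(PySem.List.pyGet? pass_fail_list (m_ind : Int)).getD ""]
        | none => ws
      else
        ws ++ ["0"]) []
  let words := words ++ [if originally_passing then "+" else "-"]
  PySem.Str.join " " words

-- ===== PORT B =====
-- literal port of Source B: words = ['0'] * n_mutants; one pass over enumerate(killed_mutants) with a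
-- seen-set, assigning words[m-1] = pass_fail_list[idx] for first-seen in-range m.
-- words[m-1] = v is pySetD (the guard 1 ≤ m ≤ n_mutants keeps the index in range);
-- pass_fail_list[idx] is pyGet? (.getD "" unreachable under Pre_: Python raises IndexError there).
def format_kill_matrix_row_muse_alt (killed_mutants : List Int) (pass_fail_list : List String) (n_mutants : Int) (originally_passing : Bool) : String :=
  let st : List String × PySem.Set Int :=
    (PySem.List.enumerate killed_mutants).foldl (fun st p =>
      if st.2.contains p.2 then st
      else
        let seen := st.2.add p.2
        if 1 ≤ p.2 ∧ p.2 ≤ n_mutants then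
          (PySem.List.pySetD st.1 (p.2 - 1) ((PySem.List.pyGet? pass_fail_list p.1).getD ""), seen)
        else (st.1, seen))
      (List.replicate n_mutants.toNat "0", PySem.Set.empty)
  let words := st.1 ++ [if originally_passing then "+" else "-"]
  PySem.Str.join " " words

-- ===== PRECONDITION & SPEC =====
-- Pre_ excludes exactly the inputs where Python A raises IndexError: a mutant number in
-- 1..n_mutants whose first index in killed_mutants is ≥ len(pass_fail_list) (B raises there too).
def Pre_format_kill_matrix_row_muse (killed_mutants : List Int) (pass_fail_list : List String) (n_mutants : Int) (originally_passing : Bool) : Prop :=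
  ∀ i ∈ killed_mutants, 1 ≤ i → i ≤ n_mutants → killed_mutants.idxOf i < pass_fail_list.length
instance (killed_mutants : List Int) (pass_fail_list : List String) (n_mutants : Int) (originally_passing : Bool) : Decidable (Pre_format_kill_matrix_row_muse killed_mutants pass_fail_list n_mutants originally_passing) := by unfold Pre_format_kill_matrix_row_muse; infer_instance

def pvWitness_format_kill_matrix_row_muse : List Int × List String × Int × Bool := ([2, 1], ["-", "+"], 2, true)

def Spec_format_kill_matrix_row_muse (killed_mutants : List Int) (pass_fail_list : List String) (n_mutants : Int) (originally_passing : Bool) (out : String) : Prop := out = format_kill_matrix_row_muse_alt killed_mutants pass_fail_list n_mutants originally_passing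
instance (killed_mutants : List Int) (pass_fail_list : List String) (n_mutants : Int) (originally_passing : Bool) (out : String) : Decidable (Spec_format_kill_matrix_row_muse killed_mutants pass_fail_list n_mutants originally_passing out) := by unfold Spec_format_kill_matrix_row_muse; infer_instance

-- ===== CLAIM (what is proved, stated in full; the proofs are below) =====
def Claim_equal_format_kill_matrix_row_muse : Prop := ∀ (killed_mutants : List Int) (pass_fail_list : List String) (n_mutants : Int) (originally_passing : Bool), Dom_format_kill_matrix_row_muse killed_mutants pass_fail_list n_mutants originally_passing → Pre_format_kill_matrix_row_muse killed_mutants pass_fail_list n_mutants originally_passing → Spec_format_kill_matrix_row_muse killed_mutants pass_fail_list n_mutants originally_passing (format_kill_matrix_row_muse killed_mutants pass_fail_list n_mutants originally_passing)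

-- ===== LEMMAS AND PROOFS =====

-- the per-slot word both programs produce for slot number i
def pvWordB (killed_mutants : List Int) (pass_fail_list : List String) (i : Int) : String :=
  match PySem.List.index? killed_mutants i with
  | some k => (PySem.List.pyGet? pass_fail_list (k : Int)).getD ""
  | none => "0"

-- A's loop body appends exactly pvWordB
theorem bodyA_eq (killed_mutants : List Int) (pass_fail_list : List String) (ws : List String) (i : Int) :
    (if killed_mutants.contains i then
        match PySem.List.index? killed_mutants i with
        | some m_ind => ws ++ [(PySem.List.pyGet? pass_fail_list (m_ind : Int)).getD ""]
        | none => ws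
      else ws ++ ["0"])
      = ws ++ [pvWordB killed_mutants pass_fail_list i] := by
  by_cases hmem : i ∈ killed_mutants
  · rcases Option.isSome_iff_exists.mp
      ((PySem.List.index?_isSome_iff killed_mutants i).mpr hmem) with ⟨k, hk⟩
    rw [if_pos (by simpa using hmem), hk, pvWordB, hk]
  · rw [if_neg (by simpa using hmem), pvWordB,
        (PySem.List.index?_eq_none_iff killed_mutants i).mpr hmem]

theorem foldA_eq_map (killed_mutants : List Int) (pass_fail_list : List String) :
    ∀ (r : List Int) (ws : List String),
      r.foldl (fun ws i =>
        if killed_mutants.contains i then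
          match PySem.List.index? killed_mutants i with
          | some m_ind => ws ++ [(PySem.List.pyGet? pass_fail_list (m_ind : Int)).getD ""]
          | none => ws
        else ws ++ ["0"]) ws
        = ws ++ r.map (pvWordB killed_mutants pass_fail_list) := by
  intro r
  induction r with
  | nil => simp
  | cons x xs ih =>
    intro ws
    rw [List.foldl_cons, bodyA_eq, List.map_cons, ih]
    simp

-- membership in a Set after add
theorem set_contains_add (s : PySem.Set Int) (x v : Int) :
    (s.add x).contains v = (s.contains v || v == x) := by
  have hiff := PySem.Set.mem_add s x v
  by_cases h1 : v ∈ s <;> by_cases h2 : v = x <;>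
    simp [List.contains_eq_mem, hiff, h1, h2]

-- B's scatter fold, slotwise: after folding the (enumerated from s) suffix xs over state (ws, seen),
-- slot j holds the value written at the first occurrence of j+1 in xs — unless j+1 was already seen
-- or is out of range, in which case the slot is untouched.
theorem scatter_getElem? (pass_fail_list : List String) (n_mutants : Int) (xs : List Int) :
    ∀ (s : Int) (ws : List String) (seen : PySem.Set Int) (j : Nat),
      (((PySem.List.enumerate xs s).foldl (fun st p =>
          if st.2.contains p.2 then st
          else
            let seen := st.2.add p.2
            if 1 ≤ p.2 ∧ p.2 ≤ n_mutants then
              (PySem.List.pySetD st.1 (p.2 - 1) ((PySem.List.pyGet? pass_fail_list p.1).getD ""), seen)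
            else (st.1, seen)) (ws, seen)).1)[j]? =
        (if seen.contains ((j : Int) + 1) = false ∧ (j : Int) + 1 ≤ n_mutants then
          match PySem.List.index? xs ((j : Int) + 1) with
          | some k => (ws.set j ((PySem.List.pyGet? pass_fail_list (s + (k : Int))).getD ""))[j]?
          | none => ws[j]?
        else ws[j]?) := by
  induction xs with
  | nil =>
    intro s ws seen j
    rw [PySem.List.enumerate_nil, List.foldl_nil,
        (PySem.List.index?_eq_none_iff ([] : List Int) _).mpr (by simp)]
    split <;> rfl
  | cons x xs ih =>
    intro s ws seen j
    rw [PySem.List.enumerate_cons, List.foldl_cons]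
    by_cases hx : ((j : Int) + 1) = x
    · -- this element targets slot j
      subst hx
      by_cases hc : seen.contains ((j : Int) + 1) = true
      · -- already seen: state unchanged, slot j frozen on both sides
        have hnc : ¬ (seen.contains ((j : Int) + 1) = false ∧ (j : Int) + 1 ≤ n_mutants) :=
          fun h => absurd (hc.symm.trans h.1) (by simp)
        rw [if_pos hc, ih, if_neg hnc, if_neg hnc]
      · have hcf : seen.contains ((j : Int) + 1) = false := by simpa using hc
        rw [if_neg hc]
        by_cases hr : 1 ≤ (j : Int) + 1 ∧ (j : Int) + 1 ≤ n_mutants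
        · -- first occurrence, in range: slot j is written now and frozen afterwards
          rw [if_pos hr, ih]
          have hset : PySem.List.pySetD ws ((j : Int) + 1 - 1)
              ((PySem.List.pyGet? pass_fail_list s).getD "")
              = ws.set j ((PySem.List.pyGet? pass_fail_list s).getD "") := by
            rw [PySem.List.pySetD_of_nonneg]
            · congr 1
              omega
            · omega
          rw [if_neg (by rw [set_contains_add]; simp),
              if_pos ⟨hcf, hr.2⟩, PySem.List.index?_cons_self, hset]
          simp [List.getElem?_set]
        · -- first occurrence, out of range: slot j never written (j+1 > n_mutants)
          rw [if_neg hr, ih, if_neg (by rw [set_contains_add]; simp),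
              if_neg (fun h => hr ⟨by omega, h.2⟩)]
    · -- this element targets a different slot: slot j unaffected by this step
      have hcontains : ∀ t : PySem.Set Int, (t.add x).contains ((j : Int) + 1) = t.contains ((j : Int) + 1) := by
        intro t
        rw [set_contains_add]
        simp [hx]
      have hidx : PySem.List.index? (x :: xs) ((j : Int) + 1)
          = (PySem.List.index? xs ((j : Int) + 1)).map (· + 1) :=
        PySem.List.index?_cons_of_ne xs (fun h => hx h.symm)
      by_cases hc : seen.contains x = true
      · -- already seen: state unchanged
        rw [if_pos hc, ih, hidx]
        by_cases hcond : seen.contains ((j : Int) + 1) = false ∧ (j : Int) + 1 ≤ n_mutants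
        · rw [if_pos hcond, if_pos hcond]
          cases hk : PySem.List.index? xs ((j : Int) + 1) with
          | none => simp
          | some k =>
            simp only [Option.map_some, Nat.cast_add, Nat.cast_one]
            rw [show (s + 1) + (k : Int) = s + ((k : Int) + 1) by ring]
        · rw [if_neg hcond, if_neg hcond]
      · rw [if_neg hc]
        by_cases hr : 1 ≤ x ∧ x ≤ n_mutants
        · -- a different slot (x-1) is written; slot j is untouched by it
          rw [if_pos hr, ih, hcontains, hidx]
          have hws : (PySem.List.pySetD ws (x - 1) ((PySem.List.pyGet? pass_fail_list s).getD ""))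
              = ws.set (x - 1).toNat ((PySem.List.pyGet? pass_fail_list s).getD "") := by
            rw [PySem.List.pySetD_of_nonneg]
            omega
          have hne : (x - 1).toNat ≠ j := by omega
          rw [hws]
          by_cases hcond : seen.contains ((j : Int) + 1) = false ∧ (j : Int) + 1 ≤ n_mutants
          · rw [if_pos hcond, if_pos hcond]
            cases hk : PySem.List.index? xs ((j : Int) + 1) with
            | none =>
              have hne' : x.toNat - 1 ≠ j := by omega
              simp [List.getElem?_set_ne hne']
            | some k =>
              simp only [Option.map_some, Nat.cast_add, Nat.cast_one]
              rw [show (s + 1) + (k : Int) = s + ((k : Int) + 1) by ring]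
              simp [List.getElem?_set]
          · rw [if_neg hcond, if_neg hcond]
            exact List.getElem?_set_ne hne
        · rw [if_neg hr, ih, hcontains, hidx]
          by_cases hcond : seen.contains ((j : Int) + 1) = false ∧ (j : Int) + 1 ≤ n_mutants
          · rw [if_pos hcond, if_pos hcond]
            cases hk : PySem.List.index? xs ((j : Int) + 1) with
            | none => simp
            | some k =>
              simp only [Option.map_some, Nat.cast_add, Nat.cast_one]
              rw [show (s + 1) + (k : Int) = s + ((k : Int) + 1) by ring]
          · rw [if_neg hcond, if_neg hcond]

-- length is preserved by the scatter fold
theorem scatter_length (pass_fail_list : List String) (n_mutants : Int) (xs : List Int) :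
    ∀ (s : Int) (ws : List String) (seen : PySem.Set Int),
      (((PySem.List.enumerate xs s).foldl (fun st p =>
          if st.2.contains p.2 then st
          else
            let seen := st.2.add p.2
            if 1 ≤ p.2 ∧ p.2 ≤ n_mutants then
              (PySem.List.pySetD st.1 (p.2 - 1) ((PySem.List.pyGet? pass_fail_list p.1).getD ""), seen)
            else (st.1, seen)) (ws, seen)).1).length = ws.length := by
  induction xs with
  | nil => intro s ws seen; rw [PySem.List.enumerate_nil, List.foldl_nil]
  | cons x xs ih =>
    intro s ws seen
    rw [PySem.List.enumerate_cons, List.foldl_cons]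
    by_cases hc : seen.contains x = true
    · simp only [hc, if_true, ih]
    · have hcf : seen.contains x = false := by simpa using hc
      simp only [hcf, Bool.false_eq_true, if_false]
      by_cases hr : 1 ≤ x ∧ x ≤ n_mutants
      · rw [if_pos hr]; rw [ih, PySem.List.length_pySetD]
      · rw [if_neg hr]; rw [ih]

-- B's scattered slot array equals A's gathered word list
theorem scatter_eq_map (killed_mutants : List Int) (pass_fail_list : List String) (n_mutants : Int) :
    ((PySem.List.enumerate killed_mutants).foldl (fun st p =>
        if st.2.contains p.2 then st
        else
          let seen := st.2.add p.2
          if 1 ≤ p.2 ∧ p.2 ≤ n_mutants then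
            (PySem.List.pySetD st.1 (p.2 - 1) ((PySem.List.pyGet? pass_fail_list p.1).getD ""), seen)
          else (st.1, seen))
        (List.replicate n_mutants.toNat "0", PySem.Set.empty)).1
      = (PySem.List.pyRange 1 (n_mutants + 1) 1).map (pvWordB killed_mutants pass_fail_list) := by
  apply List.ext_getElem?
  intro j
  by_cases hj : j < n_mutants.toNat
  · rw [scatter_getElem?, List.getElem?_map, PySem.List.getElem?_pyRange_one]
    have hlt : j < (n_mutants + 1 - 1).toNat := by omega
    rw [if_pos hlt]
    have hempty : (PySem.Set.empty : PySem.Set Int).contains ((j : Int) + 1) = false := by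
      simp [PySem.Set.empty]
    rw [if_pos ⟨hempty, by omega⟩]
    simp only [Option.map_some]
    rw [show (1 : Int) + (j : Int) = (j : Int) + 1 by ring, pvWordB]
    cases hk : PySem.List.index? killed_mutants ((j : Int) + 1) with
    | none => simp [hj]
    | some k => simp [hj]
  · rw [List.getElem?_eq_none (by rw [scatter_length]; simpa using hj),
        Eq.comm, List.getElem?_eq_none
          (by rw [List.length_map, PySem.List.length_pyRange_one]; omega)]

-- ===== VERDICT (by name: the statement is the Claim_ definition above) =====
theorem format_kill_matrix_row_muse_spec : Claim_equal_format_kill_matrix_row_muse := by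
  intro killed_mutants pass_fail_list n_mutants originally_passing _ _
  show format_kill_matrix_row_muse _ _ _ _ = format_kill_matrix_row_muse_alt _ _ _ _
  unfold format_kill_matrix_row_muse format_kill_matrix_row_muse_alt
  dsimp only
  rw [foldA_eq_map, List.nil_append, scatter_eq_map]
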